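-- pv_equiv track=rewrite | github.com/Ananta-Vaishnavi/competitive_coding | GeeksforGeeks/Wave Array/Wave Array.py | convertToWave
-- ===== SOURCE A (Python) =====
-- from typing import List
--
-- def convertToWave(n : int, a : List[int]) -> None:
--     left=0
--     right=1
--     while right<n:
--         a[right],a[left]=a[left],a[right]
--         right+=2
--         left+=2
--     return a
-- ===== SOURCE B (Python) =====
-- from typing import List
--
-- def convertToWave(n : int, a : List[int]) -> None:
--     if n > 1:
--         a[0:n-1:2], a[1:n:2] = a[1:n:2], a[0:n-1:2]
--     return a
-- ===== Notes on version B (the rewrite author's own statement) =====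
-- stated objective: idiomatic
-- what changed: B replaces A's explicit while loop with index counters by a single simultaneous step-2 slice assignment a[0:n-1:2], a[1:n:2] = a[1:n:2], a[0:n-1:2] that swaps all adjacent pairs at once.
import Mathlib
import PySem

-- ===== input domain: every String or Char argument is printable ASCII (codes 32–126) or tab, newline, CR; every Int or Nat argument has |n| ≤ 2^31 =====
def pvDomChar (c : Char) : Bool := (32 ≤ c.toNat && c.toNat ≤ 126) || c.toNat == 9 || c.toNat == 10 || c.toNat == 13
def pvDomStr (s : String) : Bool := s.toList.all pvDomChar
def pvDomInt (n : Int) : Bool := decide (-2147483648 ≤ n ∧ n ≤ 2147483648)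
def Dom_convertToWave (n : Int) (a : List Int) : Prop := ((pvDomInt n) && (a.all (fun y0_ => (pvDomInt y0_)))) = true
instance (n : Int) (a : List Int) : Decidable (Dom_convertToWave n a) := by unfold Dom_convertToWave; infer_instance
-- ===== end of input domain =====

-- B swaps all adjacent pairs at once with two step-2 slices instead of A's index loop.
-- Both Pythons mutate the argument list in place and return it; the equivalence proved
-- here is about the RETURN value only.

-- ===== PORT A =====
-- the while loop of A: left/right counters, swap a[left],a[right], advance by 2
def convertToWaveLoop (n : Int) (a : List Int) (left right : Int) : List Int :=
  if _h : right < n then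
    match PySem.List.pyGet? a left, PySem.List.pyGet? a right with
    | some al, some ar =>
        -- a[right], a[left] = a[left], a[right]  (left, right are ≥ 0 here, so .toNat is exact)
        convertToWaveLoop n ((a.set right.toNat al).set left.toNat ar) (left + 2) (right + 2)
    | _, _ => a   -- Python raises IndexError here; excluded by Pre_
  else a
termination_by (n - right).toNat
decreasing_by omega

def convertToWave (n : Int) (a : List Int) : List Int :=
  convertToWaveLoop n a 0 1

-- ===== PORT B =====
-- port of the slice assignment 'a[s:…:2] = vals' : write vals at s, s+2, s+4, …;
-- exact when vals has exactly the slice's length (Python raises ValueError otherwise;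
-- inside Pre_ the two slice lengths always match).
def assignStep2 (a : List Int) (start : Nat) (vals : List Int) : List Int :=
  match vals with
  | [] => a
  | v :: vs => assignStep2 (a.set start v) (start + 2) vs

def convertToWave_alt (n : Int) (a : List Int) : List Int :=
  if 1 < n then
    -- RHS tuple first: odds = a[1:n:2], evens = a[0:n-1:2]  (slice? is none only for step 0)
    let odds := (PySem.List.slice? a (some 1) (some n) 2).getD []
    let evens := (PySem.List.slice? a (some 0) (some (n - 1)) 2).getD []
    -- a[0:n-1:2] = odds ; a[1:n:2] = evens
    assignStep2 (assignStep2 a 0 odds) 1 evens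
  else a

-- ===== PRECONDITION & SPEC =====
-- Pre_ is exactly the set of inputs on which A returns: A indexes a[right] for every odd
-- right < n, so it raises IndexError unless n ≤ len(a), or n = len(a)+1 with len(a) even
-- (then the last odd index tried is len(a)-1).
def Pre_convertToWave (n : Int) (a : List Int) : Prop :=
  n ≤ a.length ∨ (n = a.length + 1 ∧ a.length % 2 = 0)
instance (n : Int) (a : List Int) : Decidable (Pre_convertToWave n a) := by
  unfold Pre_convertToWave; infer_instance

def pvWitness_convertToWave : Int × List Int := (4, [10, 20, 30, 40, 50])

def Spec_convertToWave (n : Int) (a : List Int) (out : List Int) : Prop := out = convertToWave_alt n a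
instance (n : Int) (a : List Int) (out : List Int) : Decidable (Spec_convertToWave n a out) := by unfold Spec_convertToWave; infer_instance

-- ===== CLAIM (what is proved, stated in full; the proofs are below) =====
def Claim_equal_convertToWave : Prop := ∀ (n : Int) (a : List Int), Dom_convertToWave n a → Pre_convertToWave n a → Spec_convertToWave n a (convertToWave n a)

-- ===== LEMMAS AND PROOFS =====

-- the common functional specification: swap adjacent pairs while more than one slot remains
def wave : Int → List Int → List Int
  | m, x :: y :: rest => if 1 < m then y :: x :: wave (m - 2) rest else x :: y :: rest
  | _, l => l

theorem wave_of_le_one (m : Int) (l : List Int) (h : m ≤ 1) : wave m l = l := by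
  match l with
  | [] => rfl
  | [x] => rfl
  | x :: y :: rest => simp [wave]; omega

theorem set_append_right (pre l : List Int) (k : Nat) (v : Int) :
    (pre ++ l).set (pre.length + k) v = pre ++ l.set k v := by
  induction pre with
  | nil => simp
  | cons p ps ih => simpa [List.set, Nat.succ_add] using ih

theorem loopA_wave (a pre : List Int) (n : Int)
    (hp : pre.length % 2 = 0)
    (H : n ≤ (pre.length + a.length : Int) ∨
      (n = (pre.length : Int) + a.length + 1 ∧ (pre.length + a.length) % 2 = 0)) :
    convertToWaveLoop n (pre ++ a) pre.length ((pre.length : Int) + 1) =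
      pre ++ wave (n - pre.length) a := by
  rw [convertToWaveLoop]
  by_cases hlt : (pre.length : Int) + 1 < n
  · rw [dif_pos hlt]
    have ha2 : 2 ≤ a.length := by
      rcases H with h | ⟨h1, h2⟩ <;> omega
    match a, ha2 with
    | x :: y :: rest, _ =>
    have hx : PySem.List.pyGet? (pre ++ x :: y :: rest) (pre.length : Int) = some x := by
      rw [PySem.List.pyGet?_natCast]
      simp [List.getElem?_append_right]
    have hy : PySem.List.pyGet? (pre ++ x :: y :: rest) ((pre.length : Int) + 1) = some y := by
      have : ((pre.length : Int) + 1) = ((pre.length + 1 : Nat) : Int) := by push_cast; ring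
      rw [this, PySem.List.pyGet?_natCast]
      rw [List.getElem?_append_right (by omega)]
      simp
    rw [hx, hy]
    have ht1 : ((pre.length : Int) + 1).toNat = pre.length + 1 := by omega
    have ht0 : ((pre.length : Int)).toNat = pre.length := by omega
    rw [ht1, ht0]
    show convertToWaveLoop n (((pre ++ x :: y :: rest).set (pre.length + 1) x).set pre.length y)
        ((pre.length : Int) + 2) ((pre.length : Int) + 1 + 2) = _
    have hset : ((pre ++ x :: y :: rest).set (pre.length + 1) x).set pre.length y
        = (pre ++ [y, x]) ++ rest := by
      rw [set_append_right pre (x :: y :: rest) 1 x]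
      rw [show pre.length = pre.length + 0 from rfl, set_append_right pre _ 0 y]
      simp
    rw [hset]
    have harg1 : (pre.length : Int) + 2 = (((pre ++ [y, x]).length : Nat) : Int) := by
      simp
    have harg2 : (pre.length : Int) + 1 + 2 = (((pre ++ [y, x]).length : Nat) : Int) + 1 := by
      simp <;> omega
    rw [harg1, harg2]
    rw [loopA_wave rest (pre ++ [y, x]) n (by simp; omega) (by simp at H ⊢; omega)]
    have hw : wave (n - pre.length) (x :: y :: rest)
        = y :: x :: wave (n - pre.length - 2) rest := by
      have h1 : (1 : Int) < n - pre.length := by omega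
      simp [wave, h1]
    rw [hw]
    have : n - ((pre ++ [y, x]).length : Int) = n - pre.length - 2 := by
      simp <;> omega
    rw [this]
    simp
  · rw [dif_neg hlt]
    rw [wave_of_le_one _ _ (by omega)]
termination_by a.length
decreasing_by simp

-- everyOther l = l[::2]
def everyOther : List Int → List Int
  | [] => []
  | [x] => [x]
  | x :: _ :: rest => x :: everyOther rest

theorem getElem?_everyOther (l : List Int) (i : Nat) : (everyOther l)[i]? = l[2 * i]? := by
  induction l using everyOther.induct generalizing i with
  | case1 => simp [everyOther]
  | case2 x =>
      match i with
      | 0 => rfl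
      | i + 1 => simp [everyOther]
  | case3 x y rest ih =>
      match i with
      | 0 => rfl
      | i + 1 =>
          have : 2 * (i + 1) = 2 * i + 1 + 1 := by omega
          simp [everyOther, this, ih]

-- a step-2 slice with nonnegative bounds is everyOther of the plain sublist
theorem slice?_step2 (xs : List Int) (s b : Nat) (hs : s ≤ xs.length) :
    PySem.List.slice? xs (some (s : Int)) (some (b : Int)) 2 =
      some (everyOther ((xs.drop s).take (b - s))) := by
  have hidx : PySem.List.sliceIndices xs.length (some (s : Int)) (some (b : Int)) 2
      = ((s : Int), min (b : Int) (xs.length : Int), 2) := by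
    simp [PySem.List.sliceIndices]
    omega
  unfold PySem.List.slice?
  rw [hidx]
  norm_num
  by_cases hlt : s < b ∧ s < xs.length
  · rw [if_pos hlt]
    have hc : ((min (b : Int) (xs.length : Int) - (s : Int) + 2 - 1) / 2).toNat
        = (min b xs.length - s + 1) / 2 := by omega
    rw [hc]
    set c : Nat := (min b xs.length - s + 1) / 2
    have hmem : ∀ k ∈ List.range c, xs[((s : Int) + 2 * (k : Int)).toNat]?
        = some (xs.getD (s + 2 * k) 0) := by
      intro k hk
      rw [List.mem_range] at hk
      have h1 : ((s : Int) + 2 * (k : Int)).toNat = s + 2 * k := by omega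
      have h2 : s + 2 * k < xs.length := by omega
      rw [h1, List.getElem?_eq_getElem h2, List.getD_eq_getElem _ _ h2]
    rw [List.filterMap_congr hmem]
    rw [show (fun x => some (xs.getD (s + 2 * x) 0)) = some ∘ (fun x => xs.getD (s + 2 * x) 0) from rfl, List.filterMap_eq_map]
    apply List.ext_getElem?
    intro i
    rw [getElem?_everyOther]
    simp only [List.getElem?_map,  List.getElem?_take, List.getElem?_drop]
    by_cases hic : i < c
    · rw [List.getElem?_range hic]
      have h2i : 2 * i < b - s := by omega
      have h2l : s + 2 * i < xs.length := by omega
      rw [if_pos h2i, List.getElem?_eq_getElem h2l]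
      simp [List.getElem?_eq_getElem h2l]
    · have hnone : (List.range c)[i]? = none := by
        apply List.getElem?_eq_none
        simpa using hic
      rw [hnone]
      by_cases hbs : 2 * i < b - s
      · rw [if_pos hbs]
        have : xs.length ≤ s + 2 * i := by omega
        simp [List.getElem?_eq_none this]
      · rw [if_neg hbs]
        rfl
  · rw [if_neg hlt]
    simp only [List.range_zero, List.filterMap_nil]
    have : (xs.drop s).take (b - s) = [] := by
      rcases Decidable.not_and_iff_not_or_not.mp hlt with h | h
      · have : b - s = 0 := by omega
        simp [this]
      · have : xs.drop s = [] := by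
          apply List.drop_eq_nil_of_le
          omega
        simp [this]
    rw [this]
    rfl

theorem assignStep2_cons_cons (p q : Int) (l vs : List Int) (k : Nat) :
    assignStep2 (p :: q :: l) (k + 2) vs = p :: q :: assignStep2 l k vs := by
  induction vs generalizing l k with
  | nil => rfl
  | cons v vs ih => simpa [assignStep2, List.set] using ih (l.set k v) (k + 2)

theorem alt_wave (a : List Int) (m : Nat) (hm : 2 ≤ m)
    (H : m ≤ a.length ∨ (m = a.length + 1 ∧ a.length % 2 = 0)) :
    assignStep2 (assignStep2 a 0 (everyOther ((a.drop 1).take (m - 1)))) 1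
        (everyOther (a.take (m - 1))) = wave (m : Int) a := by
  have ha2 : 2 ≤ a.length := by rcases H with h | ⟨h1, h2⟩ <;> omega
  match a, ha2 with
  | x :: y :: rest, _ =>
  by_cases hm2 : m = 2
  · subst hm2
    have hw : wave ((2 : Nat) : Int) (x :: y :: rest) = y :: x :: rest := by
      rw [show ((2 : Nat) : Int) = 2 from rfl]
      rw [wave, if_pos (by omega), wave_of_le_one _ _ (by omega)]
    rw [hw]
    simp [everyOther, assignStep2]
  · by_cases hm3 : m = 3
    · subst hm3
      have hw : wave ((3 : Nat) : Int) (x :: y :: rest) = y :: x :: rest := by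
        rw [show ((3 : Nat) : Int) = 3 from rfl]
        rw [wave, if_pos (by omega), wave_of_le_one _ _ (by omega)]
      rw [hw]
      match rest, H with
      | [], _ => simp [everyOther, assignStep2]
      | z :: rest', _ => simp [everyOther, assignStep2]
    · -- m ≥ 4, so rest is nonempty
      have hm4 : 4 ≤ m := by omega
      have hr1 : 1 ≤ rest.length := by
        rcases H with h | ⟨h1, h2⟩
        · simp at h; omega
        · simp at h1; omega
      match rest, hr1 with
      | z :: rest', _ =>
      have he : (x :: y :: z :: rest').take (m - 1)
          = x :: y :: (z :: rest').take (m - 3) := by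
        rw [show m - 1 = (m - 3) + 1 + 1 from by omega]
        simp
      have ho : ((x :: y :: z :: rest').drop 1).take (m - 1)
          = y :: z :: rest'.take (m - 3) := by
        rw [show m - 1 = (m - 3) + 1 + 1 from by omega]
        simp
      rw [he, ho]
      rw [show everyOther (y :: z :: rest'.take (m - 3)) = y :: everyOther (rest'.take (m - 3)) from rfl]
      rw [show everyOther (x :: y :: (z :: rest').take (m - 3)) = x :: everyOther ((z :: rest').take (m - 3)) from rfl]
      rw [show assignStep2 (x :: y :: z :: rest') 0 (y :: everyOther (rest'.take (m - 3)))
            = assignStep2 (y :: y :: z :: rest') 2 (everyOther (rest'.take (m - 3))) from rfl]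
      rw [show (2 : Nat) = 0 + 2 from rfl, assignStep2_cons_cons]
      rw [show assignStep2 (y :: y :: assignStep2 (z :: rest') 0 (everyOther (rest'.take (m - 3)))) 1
              (x :: everyOther ((z :: rest').take (m - 3)))
            = assignStep2 (y :: x :: assignStep2 (z :: rest') 0 (everyOther (rest'.take (m - 3)))) 3
              (everyOther ((z :: rest').take (m - 3))) from rfl]
      rw [show (3 : Nat) = 1 + 2 from rfl, assignStep2_cons_cons]
      have hih := alt_wave (z :: rest') (m - 2) (by omega)
        (by
          rcases H with h | ⟨h1, h2⟩
          · simp at h ⊢; omega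
          · simp at h1 h2 ⊢; omega)
      rw [show (m - 2) - 1 = m - 3 from by omega] at hih
      rw [show ((z :: rest').drop 1) = rest' from rfl] at hih
      rw [hih]
      have hw : wave ((m : Nat) : Int) (x :: y :: z :: rest')
          = y :: x :: wave (((m - 2 : Nat) : Nat) : Int) (z :: rest') := by
        rw [wave, if_pos (by omega),
          show (m : Int) - 2 = ((m - 2 : Nat) : Int) from by omega]
      rw [hw]
termination_by a.length
decreasing_by simp

-- ===== VERDICT (by name: the statement is the Claim_ definition above) =====
theorem convertToWave_spec : Claim_equal_convertToWave := by
  intro n a _ hpre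
  unfold Spec_convertToWave convertToWave convertToWave_alt
  unfold Pre_convertToWave at hpre
  by_cases h1 : 1 < n
  · rw [if_pos h1]
    have hA : convertToWaveLoop n a 0 1 = wave n a := by
      have h := loopA_wave a [] n rfl (by simpa using hpre)
      simpa using h
    rw [hA]
    have hlen1 : 1 ≤ a.length := by omega
    have hn : n = (n.toNat : Int) := by omega
    have hn1 : ((n.toNat : Nat) : Int) - 1 = ((n.toNat - 1 : Nat) : Int) := by omega
    rw [hn, hn1]
    rw [show (1 : Int) = ((1 : Nat) : Int) from rfl, show (0 : Int) = ((0 : Nat) : Int) from rfl]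
    rw [slice?_step2 a 1 n.toNat hlen1, slice?_step2 a 0 (n.toNat - 1) (by omega)]
    simp only [Option.getD_some, List.drop_zero, Nat.sub_zero]
    exact (alt_wave a n.toNat (by omega) (by omega)).symm
  · rw [if_neg h1]
    rw [convertToWaveLoop, dif_neg (by omega)]
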